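-- pv_equiv track=rewrite | github.com/jokenji19/ALLMA | unpacked_brain/allma_model/incremental_learning/social_learning_system.py | extract_social_triggers
-- ===== SOURCE A (Python) =====
-- from typing import Dict, List, Optional, Set, Tuple, Any
--
-- def extract_social_triggers(text: str) -> List[str]:
--     """Estrae i trigger sociali dal testo"""
--     # Dizionario dei trigger sociali
--     social_triggers = {
--         'work_stress': {
--             'words': {'deadline', 'pressione', 'carico', 'responsabilità'},
--             'weight': 0.8
--         },
--         'social_anxiety': {
--             'words': {'presentazione', 'pubblico', 'gruppo', 'giudizio'},
--             'weight': 0.7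
--         },
--         'team_dynamics': {
--             'words': {'conflitto', 'collaborazione', 'feedback', 'ruolo'},
--             'weight': 0.6
--         },
--         'personal_growth': {
--             'words': {'obiettivo', 'sviluppo', 'miglioramento', 'crescita'},
--             'weight': 0.5
--         }
--     }
--
--     # Analizza il testo
--     words = text.lower().split()
--     triggers = []
--
--     # Identifica i trigger presenti
--     for trigger, data in social_triggers.items():
--         if any(word in data['words'] for word in words):
--             triggers.append(trigger)
--
--     return triggers
-- ===== SOURCE B (Python) =====
-- # Single pass over the words with four boolean flags (one per category), set by an
-- # if/elif chain; the result list is then assembled from the flags in category order.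
-- _WS = {'deadline', 'pressione', 'carico', 'responsabilit\u00e0'}
-- _SA = {'presentazione', 'pubblico', 'gruppo', 'giudizio'}
-- _TD = {'conflitto', 'collaborazione', 'feedback', 'ruolo'}
-- _PG = {'obiettivo', 'sviluppo', 'miglioramento', 'crescita'}
--
-- def extract_social_triggers(text: str):
--     ws = sa = td = pg = False
--     for w in text.lower().split():
--         if w in _WS:
--             ws = True
--         elif w in _SA:
--             sa = True
--         elif w in _TD:
--             td = True
--         elif w in _PG:
--             pg = True
--     out = []
--     if ws:
--         out.append('work_stress')
--     if sa:
--         out.append('social_anxiety')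
--     if td:
--         out.append('team_dynamics')
--     if pg:
--         out.append('personal_growth')
--     return out
-- ===== Notes on version B (the rewrite author's own statement) =====
-- stated objective: alternative
-- what changed: Replaces A's loop over categories (each re-scanning all text words with any()) by a single pass over the words that sets four per-category boolean flags via an if/elif chain, assembling the result from the flags afterwards; correct because the four word sets are disjoint.
import Mathlib
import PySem

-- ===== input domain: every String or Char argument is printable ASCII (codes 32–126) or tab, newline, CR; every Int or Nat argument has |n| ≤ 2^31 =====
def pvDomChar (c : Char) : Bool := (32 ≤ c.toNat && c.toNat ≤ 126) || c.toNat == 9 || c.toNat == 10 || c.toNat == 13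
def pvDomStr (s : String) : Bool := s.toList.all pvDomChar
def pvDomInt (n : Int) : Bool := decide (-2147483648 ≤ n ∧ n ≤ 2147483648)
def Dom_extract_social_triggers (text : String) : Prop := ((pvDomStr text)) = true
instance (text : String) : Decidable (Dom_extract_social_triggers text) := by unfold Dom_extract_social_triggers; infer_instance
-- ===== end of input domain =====

-- B replaces A's category-over-words scan by one pass over the words that sets four
-- per-category boolean flags (alternative decomposition; same result proved equal).

-- ===== PORT A =====
-- A's dict maps each category to {'words': <set>, 'weight': <float>}; the weight is
-- never read by the function, so only the word sets are carried here.
def socialTriggersA : List (String × PySem.Set String) :=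
  [("work_stress", PySem.Set.ofList ["deadline", "pressione", "carico", "responsabilità"]),
   ("social_anxiety", PySem.Set.ofList ["presentazione", "pubblico", "gruppo", "giudizio"]),
   ("team_dynamics", PySem.Set.ofList ["conflitto", "collaborazione", "feedback", "ruolo"]),
   ("personal_growth", PySem.Set.ofList ["obiettivo", "sviluppo", "miglioramento", "crescita"])]

def extract_social_triggers (text : String) : List String :=
  let words := PySem.Str.split₀ (PySem.Str.lower text)
  socialTriggersA.foldl
    (fun triggers td =>
      if words.any (fun w => PySem.Set.contains td.2 w) then triggers ++ [td.1] else triggers)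
    []

-- ===== PORT B =====
def setWS : PySem.Set String := PySem.Set.ofList ["deadline", "pressione", "carico", "responsabilità"]
def setSA : PySem.Set String := PySem.Set.ofList ["presentazione", "pubblico", "gruppo", "giudizio"]
def setTD : PySem.Set String := PySem.Set.ofList ["conflitto", "collaborazione", "feedback", "ruolo"]
def setPG : PySem.Set String := PySem.Set.ofList ["obiettivo", "sviluppo", "miglioramento", "crescita"]

-- the for-loop of Source B: tail recursion over the word list carrying the four flags
def flagLoop : List String → Bool → Bool → Bool → Bool → Bool × Bool × Bool × Bool
  | [], ws, sa, td, pg => (ws, sa, td, pg)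
  | w :: rest, ws, sa, td, pg =>
    if PySem.Set.contains setWS w then flagLoop rest true sa td pg
    else if PySem.Set.contains setSA w then flagLoop rest ws true td pg
    else if PySem.Set.contains setTD w then flagLoop rest ws sa true pg
    else if PySem.Set.contains setPG w then flagLoop rest ws sa td true
    else flagLoop rest ws sa td pg

def extract_social_triggers_alt (text : String) : List String :=
  let f := flagLoop (PySem.Str.split₀ (PySem.Str.lower text)) false false false false
  (if f.1 then ["work_stress"] else []) ++
  (if f.2.1 then ["social_anxiety"] else []) ++
  (if f.2.2.1 then ["team_dynamics"] else []) ++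
  (if f.2.2.2 then ["personal_growth"] else [])

-- ===== PRECONDITION & SPEC =====
def Spec_extract_social_triggers (text : String) (out : List String) : Prop := out = extract_social_triggers_alt text
instance (text : String) (out : List String) : Decidable (Spec_extract_social_triggers text out) := by unfold Spec_extract_social_triggers; infer_instance

-- ===== CLAIM (what is proved, stated in full; the proofs are below) =====
def Claim_equal_extract_social_triggers : Prop := ∀ (text : String), Dom_extract_social_triggers text → Spec_extract_social_triggers text (extract_social_triggers text)

-- ===== LEMMAS AND PROOFS =====

-- a word in one of the four trigger sets is one of its four literals
theorem mem_setWS (w : String) (h : PySem.Set.contains setWS w = true) :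
    w = "deadline" ∨ w = "pressione" ∨ w = "carico" ∨ w = "responsabilità" := by
  have hs : setWS = ["deadline", "pressione", "carico", "responsabilità"] := by decide
  rw [hs] at h
  simpa [PySem.Set.contains, List.contains_eq_mem] using h

theorem mem_setSA (w : String) (h : PySem.Set.contains setSA w = true) :
    w = "presentazione" ∨ w = "pubblico" ∨ w = "gruppo" ∨ w = "giudizio" := by
  have hs : setSA = ["presentazione", "pubblico", "gruppo", "giudizio"] := by decide
  rw [hs] at h
  simpa [PySem.Set.contains, List.contains_eq_mem] using h

theorem mem_setTD (w : String) (h : PySem.Set.contains setTD w = true) :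
    w = "conflitto" ∨ w = "collaborazione" ∨ w = "feedback" ∨ w = "ruolo" := by
  have hs : setTD = ["conflitto", "collaborazione", "feedback", "ruolo"] := by decide
  rw [hs] at h
  simpa [PySem.Set.contains, List.contains_eq_mem] using h

-- the four sets are pairwise disjoint (the facts the if/elif chain needs)
theorem disjWS (w : String) (h : PySem.Set.contains setWS w = true) :
    PySem.Set.contains setSA w = false ∧ PySem.Set.contains setTD w = false ∧
    PySem.Set.contains setPG w = false := by
  rcases mem_setWS w h with rfl | rfl | rfl | rfl <;> decide

theorem disjSA (w : String) (h : PySem.Set.contains setSA w = true) :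
    PySem.Set.contains setTD w = false ∧ PySem.Set.contains setPG w = false := by
  rcases mem_setSA w h with rfl | rfl | rfl | rfl <;> decide

theorem disjTD (w : String) (h : PySem.Set.contains setTD w = true) :
    PySem.Set.contains setPG w = false := by
  rcases mem_setTD w h with rfl | rfl | rfl | rfl <;> decide

-- closed form of the flag loop: each flag = initial value OR "some word is in that set"
theorem flagLoop_eq (ws : List String) (a b c d : Bool) :
    flagLoop ws a b c d =
      (a || ws.any (fun w => PySem.Set.contains setWS w),
       b || ws.any (fun w => PySem.Set.contains setSA w),
       c || ws.any (fun w => PySem.Set.contains setTD w),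
       d || ws.any (fun w => PySem.Set.contains setPG w)) := by
  induction ws generalizing a b c d with
  | nil => simp [flagLoop]
  | cons w rest ih =>
    simp only [flagLoop, List.any_cons]
    split_ifs with h1 h2 h3 h4
    · obtain ⟨e1, e2, e3⟩ := disjWS w h1
      rw [ih]; simp_all
    · obtain ⟨e1, e2⟩ := disjSA w h2
      rw [ih]; simp_all
    · have e1 := disjTD w h3
      rw [ih]; simp_all
    · rw [ih]; simp_all
    · rw [ih]; simp_all

theorem ab_eq (text : String) : extract_social_triggers text = extract_social_triggers_alt text := by
  unfold extract_social_triggers extract_social_triggers_alt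
  generalize PySem.Str.split₀ (PySem.Str.lower text) = ws
  simp only [socialTriggersA, List.foldl_cons, List.foldl_nil, flagLoop_eq, Bool.false_or,
    show PySem.Set.ofList ["deadline", "pressione", "carico", "responsabilità"] = setWS from rfl,
    show PySem.Set.ofList ["presentazione", "pubblico", "gruppo", "giudizio"] = setSA from rfl,
    show PySem.Set.ofList ["conflitto", "collaborazione", "feedback", "ruolo"] = setTD from rfl,
    show PySem.Set.ofList ["obiettivo", "sviluppo", "miglioramento", "crescita"] = setPG from rfl]
  cases ws.any (fun w => PySem.Set.contains setWS w) <;>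
  cases ws.any (fun w => PySem.Set.contains setSA w) <;>
  cases ws.any (fun w => PySem.Set.contains setTD w) <;>
  cases ws.any (fun w => PySem.Set.contains setPG w) <;>
  simp

-- ===== VERDICT (by name: the statement is the Claim_ definition above) =====
theorem extract_social_triggers_spec : Claim_equal_extract_social_triggers := by
  intro text _
  exact ab_eq text
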